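-- pv_equiv track=rewrite | github.com/karuppaiya/process_mining- | combinations.py | six_combination
-- ===== SOURCE A (Python) =====
-- def six_combination(activity):
--     six_comb = []
--     for i in range(len(activity)-5):
--         if i == 0:
--             six_comb.append([activity[i],activity[i+1],activity[i+2],activity[i+3],activity[i+4],activity[i+5]])
--         else:
--             six_comb.append([activity[i],activity[i+1],activity[i+2],activity[i+3],activity[i+4],activity[i+5]])
--     return six_comb
-- ===== SOURCE B (Python) =====
-- def six_combination(activity):
--     six_comb = []
--     window = []
--     for x in activity:
--         window.append(x)
--         if len(window) == 6:
--             six_comb.append(list(window))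
--             del window[0]
--     return six_comb
-- ===== Notes on version B (the rewrite author's own statement) =====
-- stated objective: alternative
-- what changed: Replaces the index-arithmetic loop (each window rebuilt from scratch via activity[i..i+5]) by a streaming single pass that maintains a running 6-element buffer: each element is pushed into the buffer, and whenever the buffer fills a copy is emitted and its oldest element evicted, so no indexing or slicing occurs.
import Mathlib
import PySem

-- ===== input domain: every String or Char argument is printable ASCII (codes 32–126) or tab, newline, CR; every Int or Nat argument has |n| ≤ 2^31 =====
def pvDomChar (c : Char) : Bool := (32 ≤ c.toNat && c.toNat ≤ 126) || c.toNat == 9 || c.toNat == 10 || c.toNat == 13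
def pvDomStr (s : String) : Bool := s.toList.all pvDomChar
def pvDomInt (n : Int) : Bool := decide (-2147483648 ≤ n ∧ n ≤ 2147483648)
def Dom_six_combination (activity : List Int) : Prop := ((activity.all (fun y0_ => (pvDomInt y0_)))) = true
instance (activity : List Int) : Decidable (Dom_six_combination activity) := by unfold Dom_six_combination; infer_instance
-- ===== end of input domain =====

-- Header: B replaces the indexed range(len-5) loop by a streaming single pass with a
-- running 6-element buffer (push, emit a copy when full, evict the oldest); same result
-- by a different traversal, no speed claim.


-- ===== PORT A =====
def six_combination (activity : List Int) : List (List Int) :=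
  (PySem.List.pyRange 0 ((activity.length : Int) - 5) 1).foldl
    (fun six_comb i =>
      if i == 0 then
        six_comb ++ [[PySem.List.pyGetD activity i 0, PySem.List.pyGetD activity (i+1) 0,
                      PySem.List.pyGetD activity (i+2) 0, PySem.List.pyGetD activity (i+3) 0,
                      PySem.List.pyGetD activity (i+4) 0, PySem.List.pyGetD activity (i+5) 0]]
      else
        six_comb ++ [[PySem.List.pyGetD activity i 0, PySem.List.pyGetD activity (i+1) 0,
                      PySem.List.pyGetD activity (i+2) 0, PySem.List.pyGetD activity (i+3) 0,
                      PySem.List.pyGetD activity (i+4) 0, PySem.List.pyGetD activity (i+5) 0]])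
    []

-- ===== PORT B =====
-- state = (six_comb, window); push x, emit window when it has 6 elements, drop its head
def six_combination_alt (activity : List Int) : List (List Int) :=
  (activity.foldl
    (fun st x =>
      let w := st.2 ++ [x]
      if w.length == 6 then (st.1 ++ [w], w.drop 1) else (st.1, w))
    ([], [])).1

-- ===== PRECONDITION & SPEC =====
def Spec_six_combination (activity : List Int) (out : List (List Int)) : Prop := out = six_combination_alt activity
instance (activity : List Int) (out : List (List Int)) : Decidable (Spec_six_combination activity out) := by unfold Spec_six_combination; infer_instance

-- ===== CLAIM (what is proved, stated in full; the proofs are below) =====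
def Claim_equal_six_combination : Prop := ∀ (activity : List Int), Dom_six_combination activity → Spec_six_combination activity (six_combination activity)

-- ===== LEMMAS AND PROOFS =====

-- the list of all length-6 sliding windows, as a map over starting positions
def pvWin (l : List Int) : List (List Int) :=
  (List.range (l.length - 5)).map (fun k => (l.drop k).take 6)

-- windows emitted by B's streaming loop from buffer w and remaining input r
def pvWinds : List Int → List Int → List (List Int)
  | _, [] => []
  | w, x :: r =>
    let w' := w ++ [x]
    if w'.length == 6 then w' :: pvWinds (w'.drop 1) r else pvWinds w' r

theorem alt_foldl (r : List Int) : ∀ (st : List (List Int) × List Int),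
    (r.foldl
      (fun st x =>
        let w2 := st.2 ++ [x]
        if w2.length == 6 then (st.1 ++ [w2], w2.drop 1) else (st.1, w2))
      st).1 = st.1 ++ pvWinds st.2 r := by
  induction r with
  | nil => intro st; simp [pvWinds]
  | cons x r ih =>
    intro st
    rw [List.foldl_cons, ih]
    cases hb : ((st.2 ++ [x]).length == 6) <;> simp at hb <;> simp [pvWinds, hb]

theorem getD_eq_get (l : List Int) (i : Nat) (h : i < l.length) : l.getD i 0 = l[i] := by
  simp [List.getD, List.getElem?_eq_getElem h]

theorem take6_drop (l : List Int) (k : Nat) (h : k + 5 < l.length) :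
    (l.drop k).take 6 = [l.getD k 0, l.getD (k+1) 0, l.getD (k+2) 0,
                         l.getD (k+3) 0, l.getD (k+4) 0, l.getD (k+5) 0] := by
  rw [getD_eq_get l k (by omega), getD_eq_get l (k+1) (by omega), getD_eq_get l (k+2) (by omega),
      getD_eq_get l (k+3) (by omega), getD_eq_get l (k+4) (by omega), getD_eq_get l (k+5) (by omega)]
  apply List.ext_getElem
  · simp; omega
  · intro j h1 h2
    have hj : j < 6 := by simpa using h2
    rw [List.getElem_take, List.getElem_drop]
    interval_cases j <;> simp

theorem pvWin_cons (l : List Int) (h : 6 ≤ l.length) :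
    pvWin l = l.take 6 :: pvWin (l.drop 1) := by
  unfold pvWin
  obtain ⟨m, hm⟩ : ∃ m, l.length - 5 = m + 1 := ⟨l.length - 6, by omega⟩
  rw [hm, List.range_succ_eq_map]
  simp only [List.map_cons, List.map_map, List.drop_zero, List.length_drop]
  have : l.length - 1 - 5 = m := by omega
  rw [this]
  congr 1
  apply List.map_congr_left
  intro k _
  simp

theorem pvWinds_eq_pvWin : ∀ (r w : List Int), w.length ≤ 5 → pvWinds w r = pvWin (w ++ r) := by
  intro r
  induction r with
  | nil =>
    intro w hw
    simp [pvWinds, pvWin, Nat.sub_eq_zero_of_le hw]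
  | cons x r ih =>
    intro w hw
    simp only [pvWinds]
    by_cases h : (w ++ [x]).length = 6
    · have hb : ((w ++ [x]).length == 6) = true := by simpa using h
      rw [hb]
      simp only [if_true]
      have hw5 : w.length = 5 := by simp at h; omega
      have hlen : 6 ≤ (w ++ x :: r).length := by simp; omega
      rw [pvWin_cons _ hlen]
      have hassoc : w ++ x :: r = (w ++ [x]) ++ r := by simp
      congr 1
      · rw [hassoc, List.take_append_of_le_length (by simp [hw5]),
            List.take_of_length_le (by simp [hw5])]
      · rw [ih _ (by simp [hw5]), hassoc]
        congr 1
        have hne : w ≠ [] := by intro hnil; rw [hnil] at hw5; simp at hw5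
        simp [List.drop_one, List.tail_append_of_ne_nil hne]
    · have hb : ((w ++ [x]).length == 6) = false := by simpa using h
      rw [hb]
      simp only [Bool.false_eq_true, if_false]
      have hw4 : w.length ≤ 4 := by simp at h; omega
      rw [ih _ (by simp; omega)]
      congr 1
      simp

theorem six_combination_eq_map (activity : List Int) :
    six_combination activity =
      (PySem.List.pyRange 0 ((activity.length : Int) - 5) 1).map
        (fun i => [PySem.List.pyGetD activity i 0, PySem.List.pyGetD activity (i+1) 0,
                   PySem.List.pyGetD activity (i+2) 0, PySem.List.pyGetD activity (i+3) 0,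
                   PySem.List.pyGetD activity (i+4) 0, PySem.List.pyGetD activity (i+5) 0]) := by
  unfold six_combination
  simp only [ite_self]
  exact PySem.List.foldl_append_singleton_eq_map _ _ _

theorem A_eq_pvWin (l : List Int) : six_combination l = pvWin l := by
  rw [six_combination_eq_map]
  unfold pvWin
  apply List.ext_getElem
  · simp [PySem.List.length_pyRange_one]; omega
  · intro k h1 h2
    have hk : k + 5 < l.length := by
      simp at h2; omega
    simp only [List.getElem_map, PySem.List.getElem_pyRange_one, List.getElem_range, zero_add]
    rw [take6_drop l k hk]
    have c1 : ((k : Int) + 1) = ((k + 1 : Nat) : Int) := by push_cast; ring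
    have c2 : ((k : Int) + 2) = ((k + 2 : Nat) : Int) := by push_cast; ring
    have c3 : ((k : Int) + 3) = ((k + 3 : Nat) : Int) := by push_cast; ring
    have c4 : ((k : Int) + 4) = ((k + 4 : Nat) : Int) := by push_cast; ring
    have c5 : ((k : Int) + 5) = ((k + 5 : Nat) : Int) := by push_cast; ring
    rw [c1, c2, c3, c4, c5]
    simp only [PySem.List.pyGetD_natCast]

-- ===== VERDICT (by name: the statement is the Claim_ definition above) =====
theorem six_combination_spec : Claim_equal_six_combination := by
  intro activity _
  show six_combination activity = six_combination_alt activity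
  rw [A_eq_pvWin]
  unfold six_combination_alt
  rw [alt_foldl activity ([], []), pvWinds_eq_pvWin activity [] (by simp)]
  simp
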